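-- pv_equiv track=rewrite | github.com/Azen0n/text-keyword-extraction | main.py | count_number_of_articles_with_all_words
-- ===== SOURCE A (Python) =====
-- from collections import Counter
-- from functools import reduce
--
-- def count_number_of_articles_with_all_words(articles: list[list[str]]) -> dict[str, int]:
--     """Returns dictionary number of occurrences of terms in articles."""
--     word_frequency_in_all_articles = Counter(reduce(lambda x, y: x + y, articles))
--     number_of_articles_with_word = {}
--     for word in word_frequency_in_all_articles:
--         for article in articles:
--             if word in article:
--                 if word in number_of_articles_with_word:
--                     number_of_articles_with_word[word] += 1
--                 else:
--                     number_of_articles_with_word[word] = 1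
--     return number_of_articles_with_word
-- ===== SOURCE B (Python) =====
-- def count_number_of_articles_with_all_words(articles: list[list[str]]) -> dict[str, int]:
--     """One pass: for each article, increment the count of each of its distinct words."""
--     counts = {}
--     for article in articles:
--         for word in dict.fromkeys(article):
--             counts[word] = counts.get(word, 0) + 1
--     return counts
-- ===== Notes on version B (the rewrite author's own statement) =====
-- stated objective: faster
-- what changed: A concatenates all articles, builds a Counter for its key order, then for every distinct word scans every article; B makes a single pass over the articles, incrementing a dict count for each distinct word of each article, producing the same insertion-ordered dict.
-- outside the precondition, e.g. on count_number_of_articles_with_all_words([]): A raises TypeError, B returns {}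
import Mathlib
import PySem

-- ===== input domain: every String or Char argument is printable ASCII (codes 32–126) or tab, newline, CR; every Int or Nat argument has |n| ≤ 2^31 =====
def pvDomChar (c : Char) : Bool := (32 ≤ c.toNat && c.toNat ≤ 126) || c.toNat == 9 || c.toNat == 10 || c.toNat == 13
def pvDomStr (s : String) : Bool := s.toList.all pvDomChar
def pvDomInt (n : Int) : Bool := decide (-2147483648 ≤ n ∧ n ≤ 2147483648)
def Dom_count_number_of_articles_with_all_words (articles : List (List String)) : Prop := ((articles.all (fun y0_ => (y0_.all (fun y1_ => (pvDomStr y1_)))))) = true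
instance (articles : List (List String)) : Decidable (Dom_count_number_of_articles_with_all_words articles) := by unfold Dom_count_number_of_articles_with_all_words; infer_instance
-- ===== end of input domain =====

-- B replaces A's per-word scan over all articles (O(W·A·L)) by one pass over the articles,
-- incrementing the count of each distinct word of each article (O(total tokens)): asymptotically faster.

-- ===== PORT A =====
def count_number_of_articles_with_all_words (articles : List (List String)) : List (String × Int) :=
  -- reduce(lambda x, y: x + y, articles); Python raises TypeError on [], excluded by Pre_
  let allWords : List String :=
    match articles with
    | [] => []
    | h :: t => t.foldl (· ++ ·) h
  let word_frequency_in_all_articles := PySem.Dict.counter allWords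
  let number_of_articles_with_word : PySem.Dict String Int :=
    word_frequency_in_all_articles.keys.foldl (fun res word =>
      articles.foldl (fun res article =>
        if article.contains word then
          if res.contains word then res.modify word 0 (· + 1)
          else res.insert word 1
        else res) res) PySem.Dict.empty
  number_of_articles_with_word.items

-- ===== PORT B =====
def count_number_of_articles_with_all_words_alt (articles : List (List String)) : List (String × Int) :=
  (articles.foldl (fun counts article =>
      (PySem.List.dedup article).foldl (fun counts word =>
        counts.insert word (counts.getD word 0 + 1)) counts)
    (PySem.Dict.empty : PySem.Dict String Int)).items

-- ===== PRECONDITION & SPEC =====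
-- Pre_ excludes only the empty articles list, on which A's reduce raises TypeError.
def Pre_count_number_of_articles_with_all_words (articles : List (List String)) : Prop := articles ≠ []
instance (articles : List (List String)) : Decidable (Pre_count_number_of_articles_with_all_words articles) := by unfold Pre_count_number_of_articles_with_all_words; infer_instance
def pvWitness_count_number_of_articles_with_all_words : List (List String) := [["a", "b"], ["b"]]

def Spec_count_number_of_articles_with_all_words (articles : List (List String)) (out : List (String × Int)) : Prop := out = count_number_of_articles_with_all_words_alt articles
instance (articles : List (List String)) (out : List (String × Int)) : Decidable (Spec_count_number_of_articles_with_all_words articles out) := by unfold Spec_count_number_of_articles_with_all_words; infer_instance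

-- ===== CLAIM (what is proved, stated in full; the proofs are below) =====
def Claim_equal_count_number_of_articles_with_all_words : Prop := ∀ (articles : List (List String)), Dom_count_number_of_articles_with_all_words articles → Pre_count_number_of_articles_with_all_words articles → Spec_count_number_of_articles_with_all_words articles (count_number_of_articles_with_all_words articles)
-- ===== LEMMAS AND PROOFS =====
def pvStepA (w : String) (res : PySem.Dict String Int) (article : List String) : PySem.Dict String Int :=
  if article.contains w then
    if res.contains w then res.modify w 0 (· + 1)
    else res.insert w 1
  else res

lemma pvStepA_eq (w : String) (res : PySem.Dict String Int) (a : List String) :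
    pvStepA w res a = if a.contains w then res.insert w (res.getD w 0 + 1) else res := by
  unfold pvStepA
  by_cases h : a.contains w = true
  · simp only [h, if_true]
    by_cases hc : res.contains w = true
    · simp [hc, PySem.Dict.modify]
    · simp only [Bool.not_eq_true] at hc
      simp [hc, PySem.Dict.getD_of_not_contains res 0 hc]
  · simp only [Bool.not_eq_true] at h
    rw [if_neg, if_neg] <;> simp [List.contains_iff_mem] at h ⊢ <;> exact h

lemma pvReduce_eq_flatten (h : List String) (t : List (List String)) :
    t.foldl (· ++ ·) h = (h :: t).flatten := by
  induction t generalizing h with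
  | nil => simp
  | cons a t ih => simp [List.foldl_cons, ih (h ++ a), List.flatten_cons, List.append_assoc]

def pvCnt (articles : List (List String)) (w : String) : Int :=
  (articles.countP (fun a => a.contains w) : Int)

lemma pvGet_mk_last (pre : List (String × Int)) (w : String) (c : Int)
    (hw : w ∉ pre.map Prod.fst) :
    (PySem.Dict.mk (pre ++ [(w, c)])).get? w = some c := by
  induction pre with
  | nil => simp [PySem.Dict.get?_mk_cons]
  | cons p pre ih =>
    simp only [List.map_cons, List.mem_cons] at hw
    push_neg at hw
    rw [List.cons_append, PySem.Dict.get?_mk_cons, if_neg (by simpa using (Ne.symm hw.1)), ih hw.2]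

lemma pvMap_last (pre : List (String × Int)) (w : String) (c v : Int)
    (hw : w ∉ pre.map Prod.fst) :
    (pre ++ [(w, c)]).map (fun p => if (p.1 == w) = true then (w, v) else p) = pre ++ [(w, v)] := by
  rw [List.map_append]
  congr 1
  · have h : ∀ p ∈ pre, (fun p => if (p.1 == w) = true then (w, v) else p) p = id p := by
      intro p hp
      have hne : p.1 ≠ w := fun h => hw (h ▸ List.mem_map_of_mem hp)
      simp [hne]
    rw [List.map_congr_left h, List.map_id]
  · simp

lemma pvInnerA_found (w : String) (arts : List (List String)) :
    ∀ (pre : List (String × Int)) (c : Int), w ∉ pre.map Prod.fst →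
    (arts.foldl (pvStepA w) ⟨pre ++ [(w, c)]⟩).items = pre ++ [(w, c + pvCnt arts w)] := by
  induction arts with
  | nil => intro pre c hw; simp [pvCnt]
  | cons a rest ih =>
    intro pre c hw
    rw [List.foldl_cons, pvStepA_eq]
    by_cases hm : w ∈ a
    · have hmem : w ∈ (PySem.Dict.mk (pre ++ [(w, c)])).keys := by
        simp [PySem.Dict.keys]
      have hc : (PySem.Dict.mk (pre ++ [(w, c)])).contains w = true :=
        (PySem.Dict.contains_iff_mem_keys _ _).2 hmem
      have hg : (PySem.Dict.mk (pre ++ [(w, c)])).getD w 0 = c := by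
        rw [PySem.Dict.getD_eq_get?_getD, pvGet_mk_last pre w c hw]; rfl
      have hins : (PySem.Dict.mk (pre ++ [(w, c)])).insert w (c + 1) = ⟨pre ++ [(w, c + 1)]⟩ := by
        apply PySem.Dict.ext
        rw [PySem.Dict.items_insert_of_contains _ _ hc]
        exact pvMap_last pre w c (c+1) hw
      rw [if_pos (by simpa using hm), hg, hins, ih pre (c+1) hw]
      have : pvCnt (a :: rest) w = pvCnt rest w + 1 := by
        simp [pvCnt, List.countP_cons, hm]
      rw [this]; ring_nf
    · rw [if_neg (by simpa using hm), ih pre c hw]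
      have : pvCnt (a :: rest) w = pvCnt rest w := by
        simp [pvCnt, List.countP_cons, hm]
      rw [this]

lemma pvInnerA_absent (w : String) (arts : List (List String))
    (d : PySem.Dict String Int) (hw : w ∉ d.keys) (hpos : 0 < pvCnt arts w) :
    (arts.foldl (pvStepA w) d).items = d.items ++ [(w, pvCnt arts w)] := by
  induction arts with
  | nil => simp [pvCnt] at hpos
  | cons a rest ih =>
    rw [List.foldl_cons, pvStepA_eq]
    by_cases hm : w ∈ a
    · have hc : d.contains w = false := by
        rw [← Bool.not_eq_true]
        exact fun h => hw ((PySem.Dict.contains_iff_mem_keys _ _).1 h)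
      have hg : d.getD w 0 = 0 := PySem.Dict.getD_of_not_contains d 0 hc
      have hins : d.insert w (0 + 1) = ⟨d.items ++ [(w, 1)]⟩ := by
        apply PySem.Dict.ext
        rw [PySem.Dict.items_insert_of_not_contains _ _ hc]; norm_num
      rw [if_pos (by simpa using hm), hg, hins,
        pvInnerA_found w rest d.items 1 (by simpa [PySem.Dict.keys] using hw)]
      have : pvCnt (a :: rest) w = 1 + pvCnt rest w := by
        simp [pvCnt, List.countP_cons, hm]; ring
      rw [this]
    · rw [if_neg (by simpa using hm)]
      have hcnt : pvCnt (a :: rest) w = pvCnt rest w := by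
        simp [pvCnt, List.countP_cons, hm]
      rw [hcnt] at hpos ⊢
      exact ih hpos

def pvCanon (articles : List (List String)) : List (String × Int) :=
  (PySem.Set.ofList articles.flatten).map (fun w => (w, pvCnt articles w))

lemma pvOuterA (articles : List (List String)) :
    ∀ (ws : List String) (d : PySem.Dict String Int), ws.Nodup →
    (∀ w ∈ ws, ∃ a ∈ articles, w ∈ a) → (∀ w ∈ ws, w ∉ d.keys) →
    (ws.foldl (fun res word => articles.foldl (pvStepA word) res) d).items
      = d.items ++ ws.map (fun w => (w, pvCnt articles w)) := by
  intro ws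
  induction ws with
  | nil => intro d _ _ _; simp
  | cons w rest ih =>
    intro d hnd hex hdisj
    rw [List.foldl_cons]
    have hpos : 0 < pvCnt articles w := by
      obtain ⟨a, ha, hwa⟩ := hex w (by simp)
      have : 0 < articles.countP (fun a => a.contains w) :=
        List.countP_pos_iff.2 ⟨a, ha, by simpa using hwa⟩
      simp only [pvCnt]
      exact_mod_cast this
    have habs := pvInnerA_absent w articles d (hdisj w (by simp)) hpos
    have heq : articles.foldl (pvStepA w) d = ⟨d.items ++ [(w, pvCnt articles w)]⟩ :=
      PySem.Dict.ext (by rw [habs])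
    rw [heq, ih _ hnd.of_cons (fun w' hw' => hex w' (by simp [hw']))
      (fun w' hw' => by
        have h1 : w' ∉ d.keys := hdisj w' (by simp [hw'])
        have h2 : w' ≠ w := fun h => (List.nodup_cons.1 hnd).1 (h ▸ hw')
        simp only [PySem.Dict.keys, List.map_append, List.map_cons, List.map_nil,
          List.mem_append, List.mem_cons, List.not_mem_nil, or_false]
        rintro (hx | hx)
        · exact h1 (by simpa [PySem.Dict.keys] using hx)
        · exact h2 hx)]
    simp

lemma pvStepB_words :
    ∀ (ws : List String) (d : PySem.Dict String Int), ws.Nodup → d.keys.Nodup →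
    ((ws.foldl (fun counts word => counts.insert word (counts.getD word 0 + 1)) d).items
      = d.items.map (fun p => if p.1 ∈ ws then (p.1, p.2 + 1) else p)
        ++ (ws.filter (fun w => w ∉ d.keys)).map (fun w => (w, (1 : Int)))) := by
  intro ws
  induction ws with
  | nil => intro d _ _; simp
  | cons w rest ih =>
    intro d hnd hdk
    have hwrest : w ∉ rest := (List.nodup_cons.1 hnd).1
    rw [List.foldl_cons]
    by_cases hw : w ∈ d.keys
    · have hc : d.contains w = true := (PySem.Dict.contains_iff_mem_keys _ _).2 hw
      obtain ⟨v, hp⟩ : ∃ v, (w, v) ∈ d.items := by simpa [PySem.Dict.keys] using hw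
      have hg : d.getD w 0 = v := PySem.Dict.getD_of_mem_items d hp hdk 0
      have hins : d.insert w (d.getD w 0 + 1)
          = ⟨d.items.map (fun p => if (p.1 == w) = true then (w, v + 1) else p)⟩ := by
        apply PySem.Dict.ext
        rw [hg, PySem.Dict.items_insert_of_contains _ _ hc]
      have hkeys : (d.insert w (d.getD w 0 + 1)).keys = d.keys := by
        rw [hins]
        show (d.items.map (fun p => if (p.1 == w) = true then (w, v + 1) else p)).map (fun x => x.1)
          = d.items.map (fun x => x.1)
        rw [List.map_map]
        apply List.map_congr_left
        intro p _
        by_cases h : p.1 = w <;> simp [Function.comp, h]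
      rw [hins] at hkeys
      rw [hins, ih _ hnd.of_cons (by rw [hkeys]; exact hdk)]
      congr 1
      · -- map composition
        rw [show (PySem.Dict.items ⟨d.items.map (fun p => if (p.1 == w) = true then (w, v + 1) else p)⟩)
            = d.items.map (fun p => if (p.1 == w) = true then (w, v + 1) else p) from rfl,
          List.map_map]
        apply List.map_congr_left
        intro p hp'
        by_cases h : p.1 = w
        · have hv : p.2 = v := by
            have := PySem.Dict.getD_of_mem_items d (h ▸ hp' : (w, p.2) ∈ d.items) hdk 0
            omega
          simp [h, hv, hwrest]
        · simp [h, List.mem_cons]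
      · rw [hkeys]
        rw [List.filter_cons]
        simp [hw]
    · have hc : d.contains w = false := by
        rw [← Bool.not_eq_true]
        exact fun h => hw ((PySem.Dict.contains_iff_mem_keys _ _).1 h)
      have hg : d.getD w 0 = 0 := PySem.Dict.getD_of_not_contains d 0 hc
      have hins : d.insert w (d.getD w 0 + 1) = ⟨d.items ++ [(w, 1)]⟩ := by
        apply PySem.Dict.ext
        rw [hg, PySem.Dict.items_insert_of_not_contains _ _ hc]
        norm_num
      have hkeys2 : (⟨d.items ++ [(w, 1)]⟩ : PySem.Dict String Int).keys = d.keys ++ [w] := by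
        simp [PySem.Dict.keys]
      have hnodup2 : (⟨d.items ++ [(w, 1)]⟩ : PySem.Dict String Int).keys.Nodup := by
        rw [hkeys2]
        refine (List.nodup_append).2 ⟨hdk, List.nodup_singleton w, ?_⟩
        intro a ha b hb
        simp only [List.mem_singleton] at hb
        exact fun h => hw ((hb ▸ h : a = w) ▸ ha)
      rw [hins, ih _ hnd.of_cons hnodup2]
      rw [show (PySem.Dict.items (⟨d.items ++ [(w, 1)]⟩ : PySem.Dict String Int))
          = d.items ++ [(w, 1)] from rfl]
      rw [List.map_append]
      have hmap : d.items.map (fun p => if p.1 ∈ rest then (p.1, p.2 + 1) else p)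
          = d.items.map (fun p => if p.1 ∈ w :: rest then (p.1, p.2 + 1) else p) := by
        apply List.map_congr_left
        intro p hp
        have hpw : p.1 ≠ w := fun h => hw (by
          have : p.1 ∈ d.keys := by
            simpa [PySem.Dict.keys] using List.mem_map_of_mem (f := Prod.fst) hp
          rwa [h] at this)
        simp [List.mem_cons, hpw]
      have hfilt : rest.filter (fun x => decide (x ∉ (⟨d.items ++ [(w, 1)]⟩ : PySem.Dict String Int).keys))
          = rest.filter (fun x => decide (x ∉ d.keys)) := by
        rw [hkeys2]
        apply List.filter_congr
        intro x hx
        have : x ≠ w := fun h => hwrest (h ▸ hx)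
        simp [List.mem_append, this]
      rw [hmap, hfilt, List.filter_cons]
      simp [hw, hwrest]

lemma pvCnt_append_singleton (arts : List (List String)) (a : List String) (w : String) :
    pvCnt (arts ++ [a]) w = pvCnt arts w + (if w ∈ a then 1 else 0) := by
  simp only [pvCnt, List.countP_append, List.countP_cons, List.countP_nil]
  by_cases hm : w ∈ a <;> simp [hm]

lemma pvCnt_eq_zero (arts : List (List String)) (w : String) (hw : w ∉ arts.flatten) :
    pvCnt arts w = 0 := by
  simp only [pvCnt]
  have : arts.countP (fun a => a.contains w) = 0 := by
    rw [List.countP_eq_zero]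
    intro a ha hc
    exact hw (List.mem_flatten.2 ⟨a, ha, by simpa using hc⟩)
  rw [this]; rfl

lemma pvB_main (articles : List (List String)) :
    (articles.foldl (fun counts article =>
        (PySem.List.dedup article).foldl (fun counts word =>
          counts.insert word (counts.getD word 0 + 1)) counts)
      (PySem.Dict.empty : PySem.Dict String Int)).items = pvCanon articles := by
  induction articles using List.reverseRecOn with
  | nil => rfl
  | append_singleton arts a ih =>
    rw [List.foldl_append, List.foldl_cons, List.foldl_nil]
    have hd : arts.foldl (fun counts article =>
        (PySem.List.dedup article).foldl (fun counts word =>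
          counts.insert word (counts.getD word 0 + 1)) counts)
        (PySem.Dict.empty : PySem.Dict String Int) = ⟨pvCanon arts⟩ :=
      PySem.Dict.ext ih
    rw [hd]
    have hkeys : (⟨pvCanon arts⟩ : PySem.Dict String Int).keys
        = PySem.Set.ofList arts.flatten := by
      show (pvCanon arts).map (fun x => x.1) = _
      rw [pvCanon, List.map_map]
      have hcomp : ((fun x : String × Int => x.1) ∘ (fun w => (w, pvCnt arts w))) = id := rfl
      rw [hcomp, List.map_id]
    rw [pvStepB_words (PySem.List.dedup a) ⟨pvCanon arts⟩
      (PySem.Set.nodup_ofList a) (by rw [hkeys]; exact PySem.Set.nodup_ofList _)]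
    have hflat : (arts ++ [a]).flatten = arts.flatten ++ a := by simp
    rw [show (PySem.Dict.items (⟨pvCanon arts⟩ : PySem.Dict String Int)) = pvCanon arts from rfl]
    rw [show pvCanon (arts ++ [a])
        = (PySem.Set.ofList ((arts ++ [a]).flatten)).map (fun w => (w, pvCnt (arts ++ [a]) w)) from rfl,
      hflat, PySem.Set.ofList_append, PySem.Set.update_eq_append_filter, List.map_append]
    congr 1
    · rw [pvCanon, List.map_map]
      apply List.map_congr_left
      intro w hwm
      have hcnt := pvCnt_append_singleton arts a w
      by_cases hm : w ∈ a
      · have : w ∈ PySem.List.dedup a := by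
          rw [PySem.List.dedup]
          exact (PySem.Set.mem_ofList a w).2 hm
        simp [Function.comp, this, hcnt, hm]
      · have : w ∉ PySem.List.dedup a := by
          rw [PySem.List.dedup]
          exact fun h => hm ((PySem.Set.mem_ofList a w).1 h)
        simp [Function.comp, this, hcnt, hm]
    · have hfc : (PySem.List.dedup a).filter
          (fun w => decide (w ∉ (⟨pvCanon arts⟩ : PySem.Dict String Int).keys))
          = (PySem.Set.ofList a).filter (fun y => !(PySem.Set.ofList arts.flatten).contains y) := by
        rw [PySem.List.dedup]
        apply List.filter_congr
        intro x _
        rw [hkeys]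
        by_cases hx : x ∈ (PySem.Set.ofList arts.flatten : PySem.Set String)
        · rw [(PySem.Set.contains_iff _ _).2 hx]
          simp [hx]
        · have hcf : (PySem.Set.ofList arts.flatten).contains x = false := by
            rw [← Bool.not_eq_true]
            exact fun h => hx ((PySem.Set.contains_iff _ _).1 h)
          rw [hcf]
          simp [hx]
      rw [hfc]
      apply List.map_congr_left
      intro w hwm
      obtain ⟨hwa, hwn⟩ := List.mem_filter.1 hwm
      have hwa' : w ∈ a := (PySem.Set.mem_ofList a w).1 hwa
      have hwnf : w ∉ arts.flatten := by
        intro h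
        have hc : (PySem.Set.ofList arts.flatten).contains w = true :=
          (PySem.Set.contains_iff _ _).2 ((PySem.Set.mem_ofList _ w).2 h)
        rw [hc] at hwn
        exact absurd hwn (by decide)
      rw [pvCnt_append_singleton, pvCnt_eq_zero arts w hwnf]
      simp [hwa']

-- ===== VERDICT (by name: the statement is the Claim_ definition above) =====
theorem count_number_of_articles_with_all_words_spec : Claim_equal_count_number_of_articles_with_all_words := by
  intro articles _ hpre
  unfold Spec_count_number_of_articles_with_all_words
  have hb : count_number_of_articles_with_all_words_alt articles = pvCanon articles :=
    pvB_main articles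
  rw [hb]
  cases articles with
  | nil => exact absurd rfl hpre
  | cons h t =>
    show ((PySem.Dict.counter (t.foldl (· ++ ·) h)).keys.foldl
        (fun res word => (h :: t).foldl (pvStepA word) res) PySem.Dict.empty).items
      = pvCanon (h :: t)
    rw [pvReduce_eq_flatten, PySem.Dict.keys_counter]
    rw [pvOuterA (h :: t) (PySem.Set.ofList (h :: t).flatten) PySem.Dict.empty
      (PySem.Set.nodup_ofList _)
      (fun w hwm => List.mem_flatten.1 ((PySem.Set.mem_ofList _ w).1 hwm))
      (fun w _ => by simp [PySem.Dict.keys, PySem.Dict.empty])]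
    simp [pvCanon, PySem.Dict.empty]
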